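-- pv_equiv track=rewrite | github.com/somewhatlurker/pydiva | pydiva/pydsc_util.py | reorder_named_args
-- ===== SOURCE A (Python) =====
-- def reorder_named_args(param_list, param_info):
--     """
--     Converts a split param string list with named args into positional args.
--     This is not a strictly robust conversion, but instead non-named arguments from anywhere in the list
--     will be moved around to fit in the named ones where they belong.
--     """
--
--     nparam_move_map = []
--     seen_target_pos = []
--
--     # build a mapping of parameters that need to be moved and remove the name from them
--     for i, p in enumerate(param_list):
--         if '=' in p:
--             pname, pval = p.split('=', 1)
--             pname = pname.strip().lower()
--             pval = pval.strip()
--             found_target = False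
--             for j, q in enumerate(param_info):
--                 if q and q['name'] == pname:
--                     if j in seen_target_pos:
--                         raise Exception('Duplicate parameter: {}'.format(pname))
--                     nparam_move_map += [(i, j)]
--                     seen_target_pos += [j]
--                     found_target = True
--
--             if not found_target:
--                 raise ValueError('Unknown parameter name: {}'.format(pname))
--
--             param_list[i] = pval
--
--
--     captured_args = []
--
--     # sort the move map by reverse source position
--     nparam_move_map.sort(key=lambda p: p[0], reverse=True)
--     # remove and store the desired args, update nparam_move_map to be based on captured_args
--     for i, p in enumerate(nparam_move_map):
--         captured_args += [param_list.pop(p[0])]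
--         nparam_move_map[i] = (i, p[1])
--
--     # sort the move map by insertion position
--     nparam_move_map.sort(key=lambda p: p[1])
--     # insert the args
--     for i, j in nparam_move_map:
--         param_list.insert(j, captured_args[i])
--
--     return param_list
-- ===== SOURCE B (Python) =====
-- def reorder_named_args(param_list, param_info):
--     """
--     Converts a split param string list with named args into positional args.
--     Simpler direct construction instead of pop/sort/sort/insert; same in-place
--     mutation of param_list (rewritten via param_list[:] = result).
--     """
--     named = {}      # target position -> stripped value
--     leftovers = []  # non-named values in original order
--     for p in param_list:
--         if '=' in p:
--             pname, pval = p.split('=', 1)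
--             pname = pname.strip().lower()
--             pval = pval.strip()
--             matches = [j for j, q in enumerate(param_info) if q and q['name'] == pname]
--             if not matches:
--                 raise ValueError('Unknown parameter name: {}'.format(pname))
--             for j in matches:
--                 if j in named:
--                     raise Exception('Duplicate parameter: {}'.format(pname))
--                 named[j] = pval
--         else:
--             leftovers.append(p)
--     targets = sorted(named.items())
--     result = []
--     r = l = 0
--     for k in range(len(param_list)):
--         if r < len(targets) and (targets[r][0] <= k or l >= len(leftovers)):
--             result.append(targets[r][1])
--             r += 1
--         else:
--             result.append(leftovers[l])
--             l += 1
--     param_list[:] = result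
--     return param_list
-- ===== Notes on version B (the rewrite author's own statement) =====
-- stated objective: simpler
-- what changed: Phase 2's reverse-sort/pop/re-sort/insert in-place shuffling is replaced by a direct construction: collect named values into a dict keyed by target position and leftovers in order, then build the result in one merge pass over the sorted (target, value) pairs and the leftovers.
-- outside the precondition, e.g. on reorder_named_args(['a=1', 'x'], [{'name': 'a'}, {'name': 'a'}]): A returns ['1', 'x'], B returns ['1', '1']
import Mathlib
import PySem

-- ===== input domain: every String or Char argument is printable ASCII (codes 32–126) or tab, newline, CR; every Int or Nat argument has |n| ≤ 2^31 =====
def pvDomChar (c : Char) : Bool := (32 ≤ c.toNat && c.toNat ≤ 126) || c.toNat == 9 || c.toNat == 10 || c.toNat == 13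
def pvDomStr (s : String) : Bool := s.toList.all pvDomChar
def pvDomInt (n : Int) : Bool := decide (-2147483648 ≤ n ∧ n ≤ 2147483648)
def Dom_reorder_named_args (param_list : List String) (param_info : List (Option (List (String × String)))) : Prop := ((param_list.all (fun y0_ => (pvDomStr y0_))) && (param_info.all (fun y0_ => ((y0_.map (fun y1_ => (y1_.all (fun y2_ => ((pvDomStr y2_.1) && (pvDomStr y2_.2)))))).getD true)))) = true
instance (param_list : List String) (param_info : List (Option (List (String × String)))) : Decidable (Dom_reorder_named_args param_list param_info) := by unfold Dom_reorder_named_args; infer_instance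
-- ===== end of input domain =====

-- B replaces A's phase-2 pop/sort/sort/insert shuffling by a direct one-pass merge (objective: simpler).
-- A mutates param_list in place; the equivalence proved here is about the RETURN value (B's param_list[:] = result
-- leaves the argument in the same final state wherever A returns inside Pre_).

-- ===== PORT A =====
-- inner loop "for j, q in enumerate(param_info): if q and q['name'] == pname: …"
-- (none = the loop raised: KeyError on q['name'] or the 'Duplicate parameter' Exception)
def aInner (pname : String) (info : List (Option (List (String × String)))) (j : Nat)
    (seen : List Nat) (moves : List (Nat × Nat)) (i : Nat) (found : Bool) :
    Option (List (Nat × Nat) × List Nat × Bool) :=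
  match info with
  | [] => some (moves, seen, found)
  | q :: rest =>
    match q with
    | some d =>
      if d.isEmpty then aInner pname rest (j+1) seen moves i found   -- empty dict is falsy
      else
        match PySem.Dict.get? (PySem.Dict.mk d) "name" with
        | none => none                                               -- KeyError
        | some nm =>
          if nm = pname then
            if j ∈ seen then none                                    -- raise Duplicate parameter
            else aInner pname rest (j+1) (seen ++ [j]) (moves ++ [(i, j)]) i true
          else aInner pname rest (j+1) seen moves i found
    | none => aInner pname rest (j+1) seen moves i found             -- None is falsy

-- first loop "for i, p in enumerate(param_list): …" (builds the name-stripped list and the move map;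
-- none = an exception escaped: ValueError on unknown name, or one from the inner loop)
def aPhase1 (pl : List String) (info : List (Option (List (String × String)))) (i : Nat)
    (seen : List Nat) (moves : List (Nat × Nat)) : Option (List String × List (Nat × Nat)) :=
  match pl with
  | [] => some ([], moves)
  | p :: rest =>
    if PySem.Str.isIn "=" p then
      match PySem.Str.splitMax? p "=" 1 with
      | some (a :: b :: _) =>
        let pname := PySem.Str.lower (PySem.Str.strip a)
        let pval := PySem.Str.strip b
        match aInner pname info 0 seen moves i false with
        | none => none
        | some (moves', seen', found) =>
          if found then
            match aPhase1 rest info (i+1) seen' moves' with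
            | none => none
            | some (tl, m) => some (pval :: tl, m)
          else none                                                  -- raise ValueError: Unknown parameter
      | _ => none    -- unreachable: split('=',1) with '=' present has two parts
    else
      match aPhase1 rest info (i+1) seen moves with
      | none => none
      | some (tl, m) => some (p :: tl, m)

-- "for i, p in enumerate(nparam_move_map): captured_args += [param_list.pop(p[0])]; nparam_move_map[i] = (i, p[1])"
def aPopLoop (mm : List (Nat × Nat)) (pl : List String) (c : Nat)
    (captured : List String) (newmm : List (Nat × Nat)) :
    Option (List String × List String × List (Nat × Nat)) :=
  match mm with
  | [] => some (pl, captured, newmm)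
  | (s, j) :: rest =>
    match PySem.List.pop? pl (s : Int) with
    | none => none                                                   -- IndexError
    | some (x, pl') => aPopLoop rest pl' (c+1) (captured ++ [x]) (newmm ++ [(c, j)])

def reorder_named_args (param_list : List String) (param_info : List (Option (List (String × String)))) : List String :=
  match aPhase1 param_list param_info 0 [] [] with
  | none => []                                                       -- exception: outside Pre_
  | some (pl1, moves) =>
    let mmSorted := PySem.List.sorted moves (fun p => p.1) true      -- sort by reverse source position
    match aPopLoop mmSorted pl1 0 [] [] with
    | none => []                                                     -- exception: outside Pre_
    | some (pl2, captured, mm2) =>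
      let mm3 := PySem.List.sorted mm2 (fun p => p.2) false          -- sort by insertion position
      mm3.foldl (fun l pr => PySem.List.insert l (pr.2 : Int) (captured.getD pr.1 "")) pl2

-- ===== PORT B =====
-- "[j for j, q in enumerate(param_info) if q and q['name'] == pname]" (none = KeyError on q['name'])
def bMatches (pname : String) (info : List (Option (List (String × String)))) (j : Nat) :
    Option (List Nat) :=
  match info with
  | [] => some []
  | q :: rest =>
    match q with
    | some d =>
      if d.isEmpty then bMatches pname rest (j+1)
      else
        match PySem.Dict.get? (PySem.Dict.mk d) "name" with
        | none => none
        | some nm =>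
          if nm = pname then (bMatches pname rest (j+1)).map (j :: ·)
          else bMatches pname rest (j+1)
    | none => bMatches pname rest (j+1)

-- "for j in matches: if j in named: raise …; named[j] = pval"
def bAddAll (named : PySem.Dict Nat String) (v : String) (ms : List Nat) :
    Option (PySem.Dict Nat String) :=
  match ms with
  | [] => some named
  | j :: js => if PySem.Dict.contains named j then none else bAddAll (PySem.Dict.insert named j v) v js

-- the collection loop over param_list (named dict + leftovers)
def bCollect (pl : List String) (info : List (Option (List (String × String))))
    (named : PySem.Dict Nat String) (left : List String) :
    Option (PySem.Dict Nat String × List String) :=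
  match pl with
  | [] => some (named, left)
  | p :: rest =>
    if PySem.Str.isIn "=" p then
      match PySem.Str.splitMax? p "=" 1 with
      | some (a :: b :: _) =>
        let pname := PySem.Str.lower (PySem.Str.strip a)
        let pval := PySem.Str.strip b
        match bMatches pname info 0 with
        | none => none
        | some ms =>
          if ms = [] then none                                       -- raise ValueError
          else
            match bAddAll named pval ms with
            | none => none                                           -- raise Duplicate
            | some named' => bCollect rest info named' left
      | _ => none    -- unreachable: split('=',1) with '=' present has two parts
    else bCollect rest info named (left ++ [p])

-- "for k in range(n): …" — one-pass merge of the sorted (target, value) pairs with the leftovers;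
-- fuel = n; the [],[] case (Source B's IndexError) is unreachable since fuel = |ts| + |ls| when called
def bMergeGo (fuel : Nat) (k : Nat) (ts : List (Nat × String)) (ls : List String) : List String :=
  match fuel with
  | 0 => []
  | fuel + 1 =>
    match ts, ls with
    | (_j, v) :: ts', [] => v :: bMergeGo fuel (k+1) ts' []
    | (j, v) :: ts', x :: ls' =>
      if j ≤ k then v :: bMergeGo fuel (k+1) ts' (x :: ls')
      else x :: bMergeGo fuel (k+1) ((j, v) :: ts') ls'
    | [], x :: ls' => x :: bMergeGo fuel (k+1) [] ls'
    | [], [] => []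

def reorder_named_args_alt (param_list : List String) (param_info : List (Option (List (String × String)))) : List String :=
  match bCollect param_list param_info (PySem.Dict.mk []) [] with
  | none => []                                                       -- exception: outside Pre_
  | some (named, left) =>
    let ts := PySem.List.sorted (PySem.Dict.items named) (fun pr => pr.1) false  -- sorted(named.items())
    bMergeGo param_list.length 0 ts left

-- ===== PRECONDITION & SPEC =====
def pvIsNamed (p : String) : Bool := PySem.Str.isIn "=" p
def pvPName (p : String) : String :=
  PySem.Str.lower (PySem.Str.strip (((PySem.Str.splitMax? p "=" 1).getD [p]).headI))
def pvQMatch (q : Option (List (String × String))) (nm : String) : Bool :=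
  match q with
  | some d => !d.isEmpty && (PySem.Dict.get? (PySem.Dict.mk d) "name" == some nm)
  | none => false
def pvMatchIdxs (info : List (Option (List (String × String)))) (nm : String) : List Nat :=
  (info.zipIdx.filter (fun x => pvQMatch x.1 nm)).map Prod.snd

def pvHasName (q : Option (List (String × String))) : Bool :=
  match q with
  | none => true
  | some d => d.isEmpty || (PySem.Dict.get? (PySem.Dict.mk d) "name").isSome

-- Pre_ excludes inputs where some named argument's (unique, lower-cased) name occurs in more than one
-- param_info entry: there A pops the same source index twice, an artefact that either raises IndexError
-- or returns an accidental shuffling no caller could intend.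
def Pre_reorder_named_args (param_list : List String) (param_info : List (Option (List (String × String)))) : Prop :=
  ((∃ p ∈ param_list, pvIsNamed p = true) → param_info.all pvHasName = true)
  ∧ (∀ p ∈ param_list, pvIsNamed p = true → (pvMatchIdxs param_info (pvPName p)).length = 1)
  ∧ ((param_list.filter pvIsNamed).map pvPName).Nodup
instance (param_list : List String) (param_info : List (Option (List (String × String)))) : Decidable (Pre_reorder_named_args param_list param_info) := by unfold Pre_reorder_named_args; infer_instance

def pvWitness_reorder_named_args : List String × (List (Option (List (String × String)))) :=
  (["b=2", "x"], [some [("name", "a")], some [("name", "b")]])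

def Spec_reorder_named_args (param_list : List String) (param_info : List (Option (List (String × String)))) (out : List String) : Prop := out = reorder_named_args_alt param_list param_info
instance (param_list : List String) (param_info : List (Option (List (String × String)))) (out : List String) : Decidable (Spec_reorder_named_args param_list param_info out) := by unfold Spec_reorder_named_args; infer_instance

-- ===== CLAIM (what is proved, stated in full; the proofs are below) =====
def Claim_equal_reorder_named_args : Prop := ∀ (param_list : List String) (param_info : List (Option (List (String × String)))), Dom_reorder_named_args param_list param_info → Pre_reorder_named_args param_list param_info → Spec_reorder_named_args param_list param_info (reorder_named_args param_list param_info)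

-- ===== LEMMAS AND PROOFS =====


-- ---- proof-side definitions ----

def pvVal (p : String) : String := PySem.Str.strip (((PySem.Str.splitMax? p "=" 1).getD []).getD 1 "")
def stripElem (p : String) : String := if pvIsNamed p then pvVal p else p

-- matches of nm against info, scanning with offset j0 (pvMatchIdxs = msAOf info 0)
def msAOf (info : List (Option (List (String × String)))) (j0 : Nat) (nm : String) : List Nat :=
  ((info.zipIdx j0).filter (fun x => pvQMatch x.1 nm)).map Prod.snd

-- the move map contributed by pl when scanning starts at absolute index i
def movesOf (info : List (Option (List (String × String)))) (pl : List String) (i : Nat) : List (Nat × Nat) :=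
  ((pl.zipIdx i).filter (fun x => pvIsNamed x.1)).flatMap
    (fun x => (pvMatchIdxs info (pvPName x.1)).map (fun t => (x.2, t)))

-- the (target, value) pairs contributed by pl
def itemsOf (info : List (Option (List (String × String)))) (pl : List String) : List (Nat × String) :=
  (pl.filter pvIsNamed).flatMap
    (fun p => (pvMatchIdxs info (pvPName p)).map (fun t => (t, pvVal p)))

-- "phase 1 succeeds" (no exception), as a recursive predicate over the remaining params and seen targets
def phOk (info : List (Option (List (String × String)))) : List String → List Nat → Bool
  | [], _ => true
  | p :: rest, seen =>
    if pvIsNamed p then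
      match PySem.Str.splitMax? p "=" 1 with
      | some (_ :: _ :: _) =>
        info.all pvHasName &&
        !(pvMatchIdxs info (pvPName p)).isEmpty &&
        (pvMatchIdxs info (pvPName p)).all (fun t => !seen.contains t) &&
        phOk info rest (seen ++ pvMatchIdxs info (pvPName p))
      | _ => false
    else phOk info rest seen

-- ---- basic facts ----

lemma mem_msAOf_ge {info : List (Option (List (String × String)))} {j0 : Nat} {nm : String}
    {t : Nat} (h : t ∈ msAOf info j0 nm) : j0 ≤ t := by
  unfold msAOf at h
  simp only [List.mem_map, List.mem_filter] at h
  obtain ⟨⟨x, i⟩, ⟨hx, _⟩, rfl⟩ := h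
  exact (List.mem_zipIdx hx).1

lemma msAOf_cons (q : Option (List (String × String))) (rest : List (Option (List (String × String))))
    (j0 : Nat) (nm : String) :
    msAOf (q :: rest) j0 nm
      = (if pvQMatch q nm then [j0] else []) ++ msAOf rest (j0 + 1) nm := by
  unfold msAOf
  rw [List.zipIdx_cons]
  by_cases h : pvQMatch q nm = true <;> simp [h]

lemma pvMatchIdxs_eq_msAOf (info : List (Option (List (String × String)))) (nm : String) :
    pvMatchIdxs info nm = msAOf info 0 nm := rfl

-- ---- inner-loop characterizations ----

lemma aInner_eq (nm : String) :
    ∀ (info : List (Option (List (String × String)))) (j0 : Nat) (seen : List Nat)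
      (moves : List (Nat × Nat)) (i : Nat) (fnd : Bool),
    aInner nm info j0 seen moves i fnd
      = if info.all pvHasName && (msAOf info j0 nm).all (fun t => !seen.contains t) then
          some (moves ++ (msAOf info j0 nm).map (fun t => (i, t)),
                seen ++ msAOf info j0 nm,
                fnd || !(msAOf info j0 nm).isEmpty)
        else none := by
  intro info
  induction info with
  | nil => intro j0 seen moves i fnd; simp [aInner, msAOf]
  | cons q rest ih =>
    intro j0 seen moves i fnd
    rw [msAOf_cons]
    match q with
    | none =>
      simp only [aInner, ih, List.all_cons]
      simp [pvQMatch, pvHasName]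
    | some d =>
      by_cases hd : d.isEmpty
      · simp only [aInner, hd, if_pos rfl, ih]
        simp [pvQMatch, pvHasName, hd]
      · simp only [aInner, hd]
        match hg : PySem.Dict.get? (PySem.Dict.mk d) "name" with
        | none =>
          have : pvHasName (some d) = false := by simp [pvHasName, hd, hg]
          simp [List.all_cons, this]
        | some s =>
          have hhn : pvHasName (some d) = true := by simp [pvHasName, hg]
          by_cases hs : s = nm
          · subst hs
            have hq : pvQMatch (some d) s = true := by simp [pvQMatch, hd, hg]
            simp only [if_pos rfl, ih, List.all_cons, hhn, hq, Bool.true_and, List.all_append, List.all_cons]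
            by_cases hj : j0 ∈ seen
            · simp [hj]
            · simp only [hj, decide_false, Bool.not_false, Bool.true_and, List.append_assoc,
                List.singleton_append, List.map_cons]
              simp [hj]
              have hiff : ((∀ x ∈ rest, pvHasName x = true) ∧
                    ∀ x ∈ msAOf rest (j0 + 1) s, x ∉ seen ∧ ¬x = j0) ↔
                  ((∀ x ∈ rest, pvHasName x = true) ∧ ∀ x ∈ msAOf rest (j0 + 1) s, x ∉ seen) := by
                constructor
                · rintro ⟨h1, h2⟩; exact ⟨h1, fun x hx => (h2 x hx).1⟩
                · rintro ⟨h1, h2⟩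
                  refine ⟨h1, fun x hx => ⟨h2 x hx, ?_⟩⟩
                  have := mem_msAOf_ge hx; omega
              exact if_congr hiff rfl rfl
          · have hq : pvQMatch (some d) nm = false := by
              simp [pvQMatch, hd, hg]; exact fun h => absurd h hs
            simp only [if_neg hs, ih, List.all_cons, hhn, hq]
            simp


lemma bMatches_eq (nm : String) :
    ∀ (info : List (Option (List (String × String)))) (j0 : Nat),
    bMatches nm info j0 = if info.all pvHasName then some (msAOf info j0 nm) else none := by
  intro info
  induction info with
  | nil => intro j0; simp [bMatches, msAOf]
  | cons q rest ih =>
    intro j0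
    rw [msAOf_cons]
    match q with
    | none => simp [bMatches, ih, pvQMatch, pvHasName]
    | some d =>
      by_cases hd : d.isEmpty
      · simp [bMatches, hd, ih, pvQMatch, pvHasName]
      · simp only [bMatches, hd]
        match hg : PySem.Dict.get? (PySem.Dict.mk d) "name" with
        | none =>
          have : pvHasName (some d) = false := by simp [pvHasName, hd, hg]
          simp [List.all_cons, this]
        | some s =>
          have hhn : pvHasName (some d) = true := by simp [pvHasName, hg]
          by_cases hs : s = nm
          · subst hs
            have hq : pvQMatch (some d) s = true := by simp [pvQMatch, hd, hg]
            simp only [ih, List.all_cons, hhn, hq, Bool.true_and, if_pos rfl]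
            split_ifs <;> simp_all
          · have hq : pvQMatch (some d) nm = false := by
              simp [pvQMatch, hd, hg]; exact fun h => absurd h hs
            simp [ih, List.all_cons, hhn, hq, hs]

lemma bAddAll_eq (v : String) :
    ∀ (ms : List Nat) (named : PySem.Dict Nat String), ms.Nodup →
    bAddAll named v ms
      = if ms.all (fun t => !(PySem.Dict.keys named).contains t) then
          some (PySem.Dict.mk (named.items ++ ms.map (fun j => (j, v))))
        else none := by
  intro ms
  induction ms with
  | nil =>
    intro named _
    simp [bAddAll]
  | cons j js ih =>
    intro named hnd
    rw [List.nodup_cons] at hnd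
    by_cases hc : PySem.Dict.contains named j
    · have : j ∈ PySem.Dict.keys named := (PySem.Dict.contains_iff_mem_keys _ _).1 hc
      simp [bAddAll, hc, this]
    · have hj : j ∉ PySem.Dict.keys named := fun h =>
        hc ((PySem.Dict.contains_iff_mem_keys _ _).2 h)
      have hitems : (PySem.Dict.insert named j v).items = named.items ++ [(j, v)] :=
        PySem.Dict.items_insert_of_not_contains named v (by simpa using hc)
      have hkeys : PySem.Dict.keys (PySem.Dict.insert named j v)
          = PySem.Dict.keys named ++ [j] := by
        show (PySem.Dict.insert named j v).items.map Prod.fst = _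
        rw [hitems]; simp [PySem.Dict.keys]
      simp only [bAddAll, hc, Bool.false_eq_true, if_false]
      rw [ih _ hnd.2, hitems, hkeys]
      have hcong : ∀ t ∈ js, (!(PySem.Dict.keys named ++ [j]).contains t)
          = (!(PySem.Dict.keys named).contains t) := by
        intro t ht
        have : t ≠ j := fun h => hnd.1 (h ▸ ht)
        simp [List.contains_append, this]
      have hba : (js.all fun t => !(PySem.Dict.keys named ++ [j]).contains t)
          = (js.all fun t => !(PySem.Dict.keys named).contains t) := by
        apply Bool.coe_iff_coe.mp
        rw [List.all_eq_true, List.all_eq_true]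
        exact ⟨fun h t ht => by rw [← hcong t ht]; exact h t ht,
               fun h t ht => by rw [hcong t ht]; exact h t ht⟩
      rw [hba]
      simp only [List.all_cons, List.map_cons]
      have : (!(PySem.Dict.keys named).contains j) = true := by simpa using hj
      rw [this, Bool.true_and]
      split_ifs <;> simp [List.append_assoc]


lemma zipIdx_snd_pairwise {α : Type} (l : List α) (n : Nat) :
    (l.zipIdx n).Pairwise (fun a b => a.2 < b.2) := by
  rw [List.pairwise_iff_getElem]
  intro i j hi hj hij
  rw [List.getElem_zipIdx, List.getElem_zipIdx]
  omega

lemma msAOf_nodup (info : List (Option (List (String × String)))) (j0 : Nat) (nm : String) :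
    (msAOf info j0 nm).Nodup := by
  unfold msAOf
  have h : (List.filter (fun x => pvQMatch x.1 nm) (info.zipIdx j0)).Pairwise
      (fun a b => a.2 < b.2) := List.Pairwise.filter _ (zipIdx_snd_pairwise info j0)
  exact List.pairwise_map.mpr (h.imp fun hab => Nat.ne_of_lt hab)

lemma movesOf_cons (info : List (Option (List (String × String)))) (p : String)
    (rest : List String) (i : Nat) :
    movesOf info (p :: rest) i
      = (if pvIsNamed p then (pvMatchIdxs info (pvPName p)).map (fun t => (i, t)) else [])
        ++ movesOf info rest (i + 1) := by
  unfold movesOf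
  rw [List.zipIdx_cons]
  by_cases h : pvIsNamed p = true <;> simp [h]

lemma itemsOf_cons (info : List (Option (List (String × String)))) (p : String)
    (rest : List String) :
    itemsOf info (p :: rest)
      = (if pvIsNamed p then (pvMatchIdxs info (pvPName p)).map (fun t => (t, pvVal p)) else [])
        ++ itemsOf info rest := by
  unfold itemsOf
  by_cases h : pvIsNamed p = true <;> simp [h, List.filter_cons]

lemma aPhase1_eq (info : List (Option (List (String × String)))) :
    ∀ (pl : List String) (i : Nat) (seen : List Nat) (moves : List (Nat × Nat)),
    aPhase1 pl info i seen moves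
      = if phOk info pl seen then some (pl.map stripElem, moves ++ movesOf info pl i)
        else none := by
  intro pl
  induction pl with
  | nil => intro i seen moves; simp [aPhase1, phOk, movesOf]
  | cons p rest ih =>
    intro i seen moves
    rw [movesOf_cons]
    by_cases hnp : pvIsNamed p = true
    · have hnp' : PySem.Str.isIn "=" p = true := hnp
      unfold aPhase1
      rw [if_pos hnp']
      match hsp : PySem.Str.splitMax? p "=" 1 with
      | none => simp [phOk, hnp, hsp]
      | some [] => simp [phOk, hnp, hsp]
      | some [a] => simp [phOk, hnp, hsp]
      | some (a :: b :: r) =>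
        dsimp only
        have hpn : PySem.Str.lower (PySem.Str.strip a) = pvPName p := by
          unfold pvPName; rw [hsp]; rfl
        have hstrip : stripElem p = PySem.Str.strip b := by
          unfold stripElem; rw [if_pos hnp]; unfold pvVal; rw [hsp]; rfl
        rw [aInner_eq, hpn, ← pvMatchIdxs_eq_msAOf]
        have hphok : phOk info (p :: rest) seen
            = (info.all pvHasName &&
               !(pvMatchIdxs info (pvPName p)).isEmpty &&
               (pvMatchIdxs info (pvPName p)).all (fun t => !seen.contains t) &&
               phOk info rest (seen ++ pvMatchIdxs info (pvPName p))) := by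
          conv_lhs => unfold phOk
          rw [if_pos hnp, hsp]
        rw [hphok]
        by_cases hc1 : info.all pvHasName = true
        · by_cases hc2 : (pvMatchIdxs info (pvPName p)).all (fun t => !seen.contains t) = true
          · simp only [hc1, hc2, Bool.true_and, Bool.and_true]
            by_cases hne : (pvMatchIdxs info (pvPName p)).isEmpty = true
            · simp [hne]
            · have hne' : (!(pvMatchIdxs info (pvPName p)).isEmpty) = true := by simp [hne]
              rw [hne', if_pos trivial]
              dsimp only
              rw [ih]
              simp only [Bool.true_and]
              by_cases hrec : phOk info rest (seen ++ pvMatchIdxs info (pvPName p)) = true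
              · simp [hrec, hstrip, hnp, List.append_assoc]
              · simp [hrec]
          · have hc2' : ¬(∀ x ∈ pvMatchIdxs info (pvPName p), x ∉ seen) := by
              simpa using hc2
            simp [hc2, hc2']
        · have hc1' : ¬(∀ x ∈ info, pvHasName x = true) := by simpa using hc1
          simp [hc1, hc1']
    · have hnp' : PySem.Str.isIn "=" p = false := by simpa using hnp
      have hstrip : stripElem p = p := by unfold stripElem; rw [if_neg hnp]
      have hphok : phOk info (p :: rest) seen = phOk info rest seen := by
        simp [phOk, hnp]
      unfold aPhase1
      rw [if_neg (by rw [hnp']; simp), ih, hphok]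
      by_cases hrec : phOk info rest seen = true
      · simp [hrec, hstrip, hnp]
      · simp [hrec]

lemma bCollect_eq (info : List (Option (List (String × String)))) :
    ∀ (pl : List String) (named : PySem.Dict Nat String) (left : List String),
    bCollect pl info named left
      = if phOk info pl (PySem.Dict.keys named) then
          some (PySem.Dict.mk (named.items ++ itemsOf info pl),
                left ++ pl.filter (fun p => !pvIsNamed p))
        else none := by
  intro pl
  induction pl with
  | nil =>
    intro named left
    simp [bCollect, phOk, itemsOf]
  | cons p rest ih =>
    intro named left
    rw [itemsOf_cons]
    by_cases hnp : pvIsNamed p = true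
    · have hnp' : PySem.Str.isIn "=" p = true := hnp
      unfold bCollect
      rw [if_pos hnp']
      match hsp : PySem.Str.splitMax? p "=" 1 with
      | none => simp [phOk, hnp, hsp]
      | some [] => simp [phOk, hnp, hsp]
      | some [a] => simp [phOk, hnp, hsp]
      | some (a :: b :: r) =>
        dsimp only
        have hpn : PySem.Str.lower (PySem.Str.strip a) = pvPName p := by
          unfold pvPName; rw [hsp]; rfl
        have hpv : PySem.Str.strip b = pvVal p := by
          unfold pvVal; rw [hsp]; rfl
        rw [bMatches_eq]
        have hphok : phOk info (p :: rest) (PySem.Dict.keys named)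
            = (info.all pvHasName &&
               !(pvMatchIdxs info (pvPName p)).isEmpty &&
               (pvMatchIdxs info (pvPName p)).all (fun t => !(PySem.Dict.keys named).contains t) &&
               phOk info rest (PySem.Dict.keys named ++ pvMatchIdxs info (pvPName p))) := by
          conv_lhs => unfold phOk
          rw [if_pos hnp, hsp]
        rw [hphok, hpn, ← pvMatchIdxs_eq_msAOf]
        by_cases hc1 : info.all pvHasName = true
        · rw [if_pos hc1]
          dsimp only
          simp only [hc1, Bool.true_and]
          by_cases hne : (pvMatchIdxs info (pvPName p)).isEmpty = true
          · have : pvMatchIdxs info (pvPName p) = [] := by simpa using hne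
            simp [this]
          · have hmsne : ¬(pvMatchIdxs info (pvPName p) = []) := by simpa using hne
            have hne' : (!(pvMatchIdxs info (pvPName p)).isEmpty) = true := by simp [hne]
            have hnd : (pvMatchIdxs info (pvPName p)).Nodup := by
              rw [pvMatchIdxs_eq_msAOf]; exact msAOf_nodup _ _ _
            rw [if_neg hmsne, hne', bAddAll_eq _ _ _ hnd]
            simp only [Bool.true_and]
            by_cases hc2 : (pvMatchIdxs info (pvPName p)).all
                (fun t => !(PySem.Dict.keys named).contains t) = true
            · rw [if_pos hc2]
              dsimp only
              rw [ih]
              have hkeys : PySem.Dict.keys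
                  (PySem.Dict.mk (named.items ++
                    (pvMatchIdxs info (pvPName p)).map (fun j => (j, PySem.Str.strip b))))
                  = PySem.Dict.keys named ++ pvMatchIdxs info (pvPName p) := by
                show (named.items ++ _).map Prod.fst = _
                simp [PySem.Dict.keys, List.map_map, Function.comp_def]
              rw [hkeys]
              simp only [hc2, Bool.true_and]
              by_cases hrec : phOk info rest
                  (PySem.Dict.keys named ++ pvMatchIdxs info (pvPName p)) = true
              · simp [hrec, hpv, hnp, List.append_assoc]
              · simp [hrec]
            · rw [if_neg hc2]
              have hc2' : ¬(∀ x ∈ pvMatchIdxs info (pvPName p),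
                  x ∉ PySem.Dict.keys named) := by simpa using hc2
              simp [hc2, hc2']
        · have hc1' : ¬(∀ x ∈ info, pvHasName x = true) := by simpa using hc1
          simp [hc1, hc1']
    · have hnp' : PySem.Str.isIn "=" p = false := by simpa using hnp
      have hphok : phOk info (p :: rest) (PySem.Dict.keys named)
          = phOk info rest (PySem.Dict.keys named) := by
        simp [phOk, hnp]
      unfold bCollect
      rw [if_neg (by rw [hnp']; simp), ih, hphok]
      by_cases hrec : phOk info rest (PySem.Dict.keys named) = true
      · simp [hrec, hnp, List.append_assoc, List.filter_cons]
      · simp [hrec]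


-- ---- phase 2: the merge pass ----

-- insertion at a (clamped) position, the shape list.insert produces
def insAt (R : List String) (m : Nat) (v : String) : List String :=
  R.take m ++ v :: R.drop m

lemma insert_eq_insAt (R : List String) (j : Nat) (v : String) :
    PySem.List.insert R (j : Int) v = insAt R j v := by
  unfold insAt
  by_cases h : j ≤ R.length
  · rw [PySem.List.insert_natCast R j v h]
  · push_neg at h
    rw [List.take_of_length_le (le_of_lt h), List.drop_of_length_le (le_of_lt h)]
    simp only [PySem.List.insert, PySem.List.sliceIndices]
    have e : ((if ((j : Int)) < 0 then
          max ((j : Int) + (R.length : Int)) (if (1 : Int) < 0 then -1 else 0)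
        else min (j : Int) (if (1 : Int) < 0 then (R.length : Int) - 1
          else (R.length : Int)))).toNat = R.length := by
      rw [if_neg (by omega), if_neg (by norm_num)]
      omega
    rw [e, List.take_of_length_le (le_refl _), List.drop_of_length_le (le_refl _)]

lemma insAt_cons (x : String) (R : List String) (m : Nat) (v : String) :
    insAt (x :: R) (m + 1) v = x :: insAt R m v := by
  simp [insAt]

lemma bMergeGo_nil_ls (L : List String) : ∀ k, bMergeGo L.length k [] L = L := by
  induction L with
  | nil => intro k; rfl
  | cons x ls ih => intro k; simpa [bMergeGo] using ih (k + 1)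

lemma bMergeGo_nil_ts (T : List (Nat × String)) : ∀ k, bMergeGo T.length k T [] = T.map Prod.snd := by
  induction T with
  | nil => intro k; rfl
  | cons t ts ih =>
    intro t0
    match t with
    | (j, v) => simpa [bMergeGo] using ih (t0 + 1)

lemma headI_mem_of_ne_nil {l : List Nat} (h : l ≠ []) : l.headI ∈ l := by
  cases l <;> simp_all

lemma pw_sum_le (j : Nat) : ∀ (T : List (Nat × String)) (k : Nat),
    (T.map Prod.fst ++ [j]).Pairwise (· < ·) →
    k ≤ (T.map Prod.fst ++ [j]).headI →
    k + T.length ≤ j := by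
  intro T
  induction T with
  | nil => intro k _ hk; simpa using hk
  | cons t ts ih =>
    intro k hpw hk
    simp only [List.map_cons, List.cons_append, List.pairwise_cons] at hpw
    have hhead : t.1 + 1 ≤ (ts.map Prod.fst ++ [j]).headI := by
      have hm : (ts.map Prod.fst ++ [j]).headI ∈ ts.map Prod.fst ++ [j] :=
        headI_mem_of_ne_nil (by simp)
      have := hpw.1 _ hm
      omega
    have := ih (t.1 + 1) hpw.2 hhead
    simp only [List.map_cons, List.cons_append, List.headI_cons] at hk
    simp only [List.length_cons]
    omega

lemma mergeS (j : Nat) (v : String) : ∀ (n : Nat) (T : List (Nat × String)) (L : List String) (k : Nat),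
    T.length + L.length = n →
    (T.map Prod.fst ++ [j]).Pairwise (· < ·) →
    k ≤ (T.map Prod.fst ++ [j]).headI →
    bMergeGo (n + 1) k (T ++ [(j, v)]) L = insAt (bMergeGo n k T L) (j - k) v := by
  intro n
  induction n using Nat.strong_induction_on with
  | _ n ih =>
    intro T L k hn hpw hk
    match T, L with
    | [], [] =>
      subst hn
      simp [bMergeGo, insAt]
    | [], x :: ls =>
      simp only [List.map_nil, List.nil_append, List.headI_cons] at hk
      simp only [List.length_nil, Nat.zero_add] at hn
      subst hn
      simp only [List.nil_append, List.length_cons]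
      by_cases hjk : j ≤ k
      · have : j = k := le_antisymm hjk hk
        subst this
        rw [show bMergeGo (ls.length + 1 + 1) j [(j, v)] (x :: ls)
            = v :: bMergeGo (ls.length + 1) (j + 1) [] (x :: ls) from by simp [bMergeGo]]
        rw [show bMergeGo (ls.length + 1) (j + 1) [] (x :: ls) = x :: ls from by
          simpa using bMergeGo_nil_ls (x :: ls) (j + 1)]
        rw [show bMergeGo (ls.length + 1) j [] (x :: ls) = x :: ls from by
          simpa using bMergeGo_nil_ls (x :: ls) j]
        simp [insAt]
      · have hlt : k < j := lt_of_not_ge hjk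
        rw [show bMergeGo (ls.length + 1 + 1) k [(j, v)] (x :: ls)
            = x :: bMergeGo (ls.length + 1) (k + 1) [(j, v)] ls from by simp [bMergeGo, hjk]]
        have hrec := ih ls.length (by simpa using Nat.lt_succ_self ls.length) [] ls (k + 1)
          (by simp) (by simpa using hpw)
          (by simpa using hlt)
        simp only [List.nil_append] at hrec
        rw [hrec, bMergeGo_nil_ls ls (k + 1)]
        rw [show bMergeGo (ls.length + 1) k [] (x :: ls) = x :: ls from by
          simpa using bMergeGo_nil_ls (x :: ls) k]
        rw [show j - k = (j - (k + 1)) + 1 from by omega, insAt_cons]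
    | (j', v') :: T', [] =>
      have hsum : k + ((j', v') :: T').length ≤ j := pw_sum_le j ((j', v') :: T') k hpw hk
      simp only [List.length_cons, List.length_nil, Nat.add_zero] at hn
      subst hn
      have e1 : bMergeGo (T'.length + 1 + 1) k (((j', v') :: T') ++ [(j, v)]) []
          = (((j', v') :: T') ++ [(j, v)]).map Prod.snd := by
        simpa using bMergeGo_nil_ts (((j', v') :: T') ++ [(j, v)]) k
      have e2 : bMergeGo (T'.length + 1) k ((j', v') :: T') []
          = ((j', v') :: T').map Prod.snd := by
        simpa using bMergeGo_nil_ts ((j', v') :: T') k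
      rw [e1, e2]
      have hlen : (((j', v') :: T').map Prod.snd).length ≤ j - k := by
        simp only [List.length_map, List.length_cons]
        simp only [List.length_cons] at hsum
        omega
      unfold insAt
      rw [List.take_of_length_le hlen, List.drop_of_length_le hlen]
      simp
    | (j', v') :: T', x :: ls =>
      have hkj' : k ≤ j' := by simpa using hk
      simp only [List.map_cons, List.cons_append, List.pairwise_cons] at hpw
      have hpw' : (T'.map Prod.fst ++ [j]).Pairwise (· < ·) := hpw.2
      have hj'h : j' < (T'.map Prod.fst ++ [j]).headI := by
        have hm : (T'.map Prod.fst ++ [j]).headI ∈ T'.map Prod.fst ++ [j] :=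
          headI_mem_of_ne_nil (by simp)
        exact hpw.1 _ hm
      have hj_gt : k < j := by
        have := hpw.1 j (by simp)
        omega
      simp only [List.length_cons] at hn
      by_cases hj'k : j' ≤ k
      · have hn' : T'.length + (x :: ls).length = n - 1 := by simp; omega
        have hrec := ih (n - 1) (by omega) T' (x :: ls) (k + 1) hn' hpw' (by omega)
        rw [show n + 1 = (n - 1 + 1) + 1 from by omega, List.cons_append]
        rw [show bMergeGo ((n - 1 + 1) + 1) k ((j', v') :: (T' ++ [(j, v)])) (x :: ls)
            = v' :: bMergeGo (n - 1 + 1) (k + 1) (T' ++ [(j, v)]) (x :: ls) from by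
          simp [bMergeGo, hj'k]]
        rw [hrec]
        rw [show n = (n - 1) + 1 from by omega]
        rw [show bMergeGo ((n - 1) + 1) k ((j', v') :: T') (x :: ls)
            = v' :: bMergeGo (n - 1) (k + 1) T' (x :: ls) from by simp [bMergeGo, hj'k]]
        rw [show j - k = (j - (k + 1)) + 1 from by omega, insAt_cons,
          show n - 1 + 1 - 1 = n - 1 from by omega]
      · have hn' : ((j', v') :: T').length + ls.length = n - 1 := by simp; omega
        have hrec := ih (n - 1) (by omega) ((j', v') :: T') ls (k + 1) hn'
          (by simp only [List.map_cons, List.cons_append, List.pairwise_cons]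
              exact ⟨hpw.1, hpw.2⟩)
          (by simp only [List.map_cons, List.cons_append, List.headI_cons]; omega)
        rw [show n + 1 = (n - 1 + 1) + 1 from by omega, List.cons_append]
        rw [show bMergeGo ((n - 1 + 1) + 1) k ((j', v') :: (T' ++ [(j, v)])) (x :: ls)
            = x :: bMergeGo (n - 1 + 1) (k + 1) ((j', v') :: T' ++ [(j, v)]) ls from by
          simp [bMergeGo, hj'k]]
        rw [show ((j', v') :: T' ++ [(j, v)]) = ((j', v') :: T') ++ [(j, v)] from rfl, hrec]
        rw [show n = (n - 1) + 1 from by omega]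
        rw [show bMergeGo ((n - 1) + 1) k ((j', v') :: T') (x :: ls)
            = x :: bMergeGo (n - 1) (k + 1) ((j', v') :: T') ls from by simp [bMergeGo, hj'k]]
        rw [show j - k = (j - (k + 1)) + 1 from by omega, insAt_cons,
          show n - 1 + 1 - 1 = n - 1 from by omega]

lemma foldIns : ∀ (T : List (Nat × String)) (L : List String),
    (T.map Prod.fst).Pairwise (· < ·) →
    T.foldl (fun pl pr => PySem.List.insert pl (pr.1 : Int) pr.2) L
      = bMergeGo (T.length + L.length) 0 T L := by
  intro T
  induction T using List.reverseRecOn with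
  | nil => intro L _; simpa using (bMergeGo_nil_ls L 0).symm
  | append_singleton T' t ihp =>
    intro L hpw
    match t with
    | (j, v) =>
      rw [List.foldl_append]
      simp only [List.foldl_cons, List.foldl_nil]
      have hpw' : (T'.map Prod.fst).Pairwise (· < ·) := by
        rw [List.map_append] at hpw
        exact hpw.sublist (List.sublist_append_left _ _)
      rw [ihp L hpw', insert_eq_insAt]
      have hch : (T'.map Prod.fst ++ [j]).Pairwise (· < ·) := by
        rw [List.map_append] at hpw
        simpa using hpw
      have := (mergeS j v (T'.length + L.length) T' L 0 rfl hch (Nat.zero_le _)).symm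
      simpa [Nat.add_right_comm] using this


-- ---- phase 2: the pop loop ----

def eraseIdxs (P : List String) (srcs : List Nat) : List String :=
  srcs.foldl (fun l s => l.eraseIdx s) P

lemma aPopLoop_eq : ∀ (mm : List (Nat × Nat)) (P : List String) (c : Nat)
    (cap : List String) (acc : List (Nat × Nat)),
    (mm.map Prod.fst).Pairwise (· > ·) →
    (∀ s ∈ mm.map Prod.fst, s < P.length) →
    aPopLoop mm P c cap acc
      = some (eraseIdxs P (mm.map Prod.fst),
              cap ++ mm.map (fun m => P.getD m.1 ""),
              acc ++ (mm.zipIdx c).map (fun x => (x.2, x.1.2))) := by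
  intro mm
  induction mm with
  | nil => intro P c cap acc _ _; simp [aPopLoop, eraseIdxs]
  | cons m rest ih =>
    intro P c cap acc hpw hlt
    match m with
    | (s, t) =>
      have hs : s < P.length := hlt s (by simp)
      have hpop : PySem.List.pop? P (s : Int) = some (P[s], P.eraseIdx s) :=
        PySem.List.pop?_natCast P s hs
      simp only [aPopLoop, hpop]
      simp only [List.map_cons, List.pairwise_cons] at hpw
      have hlt' : ∀ s' ∈ rest.map Prod.fst, s' < (P.eraseIdx s).length := by
        intro s' hmem
        have h1 : s' < s := hpw.1 s' hmem
        have h2 : (P.eraseIdx s).length = P.length - 1 := List.length_eraseIdx_of_lt hs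
        omega
      rw [ih (P.eraseIdx s) (c + 1) (cap ++ [P[s]]) (acc ++ [(c, t)]) hpw.2 hlt']
      have hvals : rest.map (fun m => (P.eraseIdx s).getD m.1 "")
          = rest.map (fun m => P.getD m.1 "") := by
        apply List.map_congr_left
        intro x hx
        have hxs : x.1 < s := hpw.1 x.1 (List.mem_map_of_mem hx)
        rw [List.getD_eq_getElem?_getD, List.getD_eq_getElem?_getD,
          List.getElem?_eraseIdx_of_lt hxs]
      rw [hvals]
      have hget : P.getD s "" = P[s] := by
        rw [List.getD_eq_getElem?_getD, List.getElem?_eq_getElem hs]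
        rfl
      simp only [eraseIdxs, List.foldl_cons, List.map_cons, List.zipIdx_cons, List.append_assoc,
        List.singleton_append, hget]

lemma eraseIdxs_eq_filter : ∀ (srcs : List Nat) (P : List String),
    srcs.Pairwise (· < ·) →
    (∀ s ∈ srcs, s < P.length) →
    eraseIdxs P srcs.reverse
      = (P.zipIdx.filter (fun x => !srcs.contains x.2)).map Prod.fst := by
  intro srcs
  induction srcs using List.reverseRecOn with
  | nil => intro P _ _; simp [eraseIdxs]
  | append_singleton srcs' s ihp =>
    intro P hpw hlt
    have hs : s < P.length := hlt s (by simp)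
    have hsmax : ∀ u ∈ srcs', u < s := by
      intro u hu
      have := List.pairwise_append.mp hpw
      exact this.2.2 u hu s (by simp)
    have hpw' : srcs'.Pairwise (· < ·) := (List.pairwise_append.mp hpw).1
    rw [List.reverse_append, List.reverse_singleton]
    show eraseIdxs (P.eraseIdx s) srcs'.reverse = _
    rw [ihp (P.eraseIdx s) hpw' (by
      intro u hu
      have h2 : (P.eraseIdx s).length = P.length - 1 := List.length_eraseIdx_of_lt hs
      have := hsmax u hu
      omega)]
    -- split P at index s: erasing the (largest) index s drops exactly that entry
    have hP : P = P.take s ++ P[s] :: P.drop (s + 1) := by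
      conv_lhs => rw [← List.take_append_drop s P]
      rw [List.drop_eq_getElem_cons hs]
    have htl : (P.take s).length = s := List.length_take_of_le (le_of_lt hs)
    rw [List.eraseIdx_eq_take_drop_succ]
    conv_rhs => rw [hP]
    rw [List.zipIdx_append, List.zipIdx_append, List.zipIdx_cons, htl]
    simp only [Nat.zero_add]
    rw [List.filter_append, List.filter_append, List.filter_cons]
    have hmid : (!(srcs' ++ [s]).contains ((P[s], s) : String × Nat).2) = false := by simp
    rw [hmid]
    simp only [Bool.false_eq_true, if_false]
    have h1 : List.filter (fun x => !(srcs' ++ [s]).contains x.2) ((P.take s).zipIdx 0)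
        = List.filter (fun x => !srcs'.contains x.2) ((P.take s).zipIdx 0) := by
      apply List.filter_congr
      intro x hx
      have hxlt : x.2 < s := by
        have := List.mem_zipIdx hx
        omega
      have : x.2 ≠ s := by omega
      simp [List.contains_append, this]
    have h2 : List.filter (fun x => !srcs'.contains x.2) ((P.drop (s + 1)).zipIdx s)
        = (P.drop (s + 1)).zipIdx s := by
      apply List.filter_eq_self.mpr
      intro x hx
      have hxge : s ≤ x.2 := (List.mem_zipIdx hx).1
      have : ∀ u ∈ srcs', u ≠ x.2 := by
        intro u hu
        have := hsmax u hu
        omega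
      simpa using fun hc => absurd rfl (this x.2 (by simpa using hc))
    have h3 : List.filter (fun x => !(srcs' ++ [s]).contains x.2)
          ((P.drop (s + 1)).zipIdx (s + 1))
        = (P.drop (s + 1)).zipIdx (s + 1) := by
      apply List.filter_eq_self.mpr
      intro x hx
      have hxge : s + 1 ≤ x.2 := (List.mem_zipIdx hx).1
      have hne : x.2 ≠ s := by omega
      have : ∀ u ∈ srcs', u ≠ x.2 := by
        intro u hu
        have := hsmax u hu
        omega
      have e1 : x.2 ∉ srcs' := fun hc => absurd rfl (this x.2 hc)
      simp [e1, hne]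
    rw [h1, h2, h3, List.map_append, List.map_append]
    congr 1
    exact (List.zipIdx_map_fst s _).trans (List.zipIdx_map_fst (s + 1) _).symm



-- ---- assembly helpers ----

def theJ (info : List (Option (List (String × String)))) (nm : String) : Nat :=
  (pvMatchIdxs info nm).headI

lemma flatMap_eq_map_of_singleton {α β : Type} (l : List α) (g : α → List β) (h : α → β)
    (hs : ∀ x ∈ l, g x = [h x]) : l.flatMap g = l.map h := by
  induction l with
  | nil => rfl
  | cons a t ih =>
    rw [List.flatMap_cons, hs a (by simp), ih (fun x hx => hs x (by simp [hx]))]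
    rfl

lemma filter_zipIdx_map {β : Type} (q : String → Bool) (g : String → β) :
    ∀ (pl : List String) (n : Nat),
    ((pl.zipIdx n).filter (fun x => q x.1)).map (fun x => g x.1) = (pl.filter q).map g := by
  intro pl
  induction pl with
  | nil => intro n; rfl
  | cons p rest ih =>
    intro n
    rw [List.zipIdx_cons, List.filter_cons, List.filter_cons]
    by_cases hq : q p = true
    · rw [if_pos hq, if_pos hq, List.map_cons, List.map_cons, ih]
    · rw [if_neg (by simp [hq]), if_neg (by simp [hq]), ih]

lemma zipIdx_map_fst_comp {α β : Type} (l : List α) (n : Nat) (g : α → β) :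
    (l.zipIdx n).map (fun x => g x.1) = l.map g := by
  have : (l.zipIdx n).map (fun x => g x.1) = ((l.zipIdx n).map Prod.fst).map g := by
    rw [List.map_map]; rfl
  rw [this, List.zipIdx_map_fst]

lemma zipIdx_snd_inj {α : Type} {l : List α} {n : Nat} {x y : α × Nat}
    (hx : x ∈ l.zipIdx n) (hy : y ∈ l.zipIdx n) (h : x.2 = y.2) : x = y := by
  obtain ⟨x1, x2⟩ := x
  obtain ⟨y1, y2⟩ := y
  simp only at h
  subst h
  obtain ⟨_, _, hx3⟩ := List.mem_zipIdx hx
  obtain ⟨_, _, hy3⟩ := List.mem_zipIdx hy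
  rw [hx3, hy3]

lemma mem_pvMatchIdxs {info : List (Option (List (String × String)))} {nm : String} {j : Nat}
    (h : j ∈ pvMatchIdxs info nm) :
    ∃ hj : j < info.length, pvQMatch info[j] nm = true := by
  unfold pvMatchIdxs at h
  simp only [List.mem_map, List.mem_filter] at h
  obtain ⟨⟨x, i⟩, ⟨hx, hq⟩, rfl⟩ := h
  obtain ⟨h1, h2, h3⟩ := List.mem_zipIdx hx
  simp only [Nat.zero_add] at h2
  refine ⟨h2, ?_⟩
  simp only [Nat.sub_zero] at h3
  rw [← h3]
  exact hq

lemma pvMatchIdxs_inj {info : List (Option (List (String × String)))} {nm nm' : String} {j : Nat}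
    (h : j ∈ pvMatchIdxs info nm) (h' : j ∈ pvMatchIdxs info nm') : nm = nm' := by
  obtain ⟨hj, hq⟩ := mem_pvMatchIdxs h
  obtain ⟨_, hq'⟩ := mem_pvMatchIdxs h'
  unfold pvQMatch at hq hq'
  match hinfo : info[j] with
  | none => rw [hinfo] at hq; simp at hq
  | some d =>
    rw [hinfo] at hq hq'
    simp only [Bool.and_eq_true, beq_iff_eq] at hq hq'
    rw [hq.2] at hq'
    exact Option.some.injEq _ _ ▸ hq'.2.symm ▸ rfl

lemma pairwise_lt_of_le_nodup {l : List Nat} (h1 : l.Pairwise (· ≤ ·)) (h2 : l.Nodup) :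
    l.Pairwise (· < ·) :=
  (h1.and h2).imp (fun ⟨hle, hne⟩ => lt_of_le_of_ne hle hne)

lemma singleton_of_length_one {l : List Nat} (h : l.length = 1) : l = [l.headI] := by
  match l with
  | [a] => rfl

-- ===== VERDICT (by name: the statement is the Claim_ definition above) =====
-- the main phase-2 equivalence, once phase 1 has produced the stripped list and the move map
lemma main_ok (pl : List String) (info : List (Option (List (String × String))))
    (hpre2 : ∀ p ∈ pl, pvIsNamed p = true → (pvMatchIdxs info (pvPName p)).length = 1)
    (hpre3 : ((pl.filter pvIsNamed).map pvPName).Nodup) :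
    (let P := pl.map stripElem
     let M := movesOf info pl 0
     let mmSorted := PySem.List.sorted M (fun p => p.1) true
     match aPopLoop mmSorted P 0 [] [] with
     | none => []
     | some (pl2, captured, mm2) =>
       (PySem.List.sorted mm2 (fun p => p.2) false).foldl
         (fun l pr => PySem.List.insert l (pr.2 : Int) (captured.getD pr.1 "")) pl2)
    = bMergeGo pl.length 0
        (PySem.List.sorted (itemsOf info pl) (fun pr => pr.1) false)
        (pl.filter (fun p => !pvIsNamed p)) := by
  show (match aPopLoop (PySem.List.sorted (movesOf info pl 0) (fun p => p.1) true)
      (pl.map stripElem) 0 [] [] with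
    | none => []
    | some (pl2, captured, mm2) =>
      (PySem.List.sorted mm2 (fun p => p.2) false).foldl
        (fun (l : List String) (pr : Nat × Nat) =>
          PySem.List.insert l (pr.2 : Int) (captured.getD pr.1 "")) pl2) = _
  set P := pl.map stripElem with hPdef
  set M := movesOf info pl 0 with hMdef
  set mmSorted := PySem.List.sorted M (fun p => p.1) true with hmmSdef
  have hsingle : ∀ p ∈ pl, pvIsNamed p = true →
      pvMatchIdxs info (pvPName p) = [theJ info (pvPName p)] :=
    fun p hp hn => singleton_of_length_one (hpre2 p hp hn)
  -- the move map in closed map form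
  have hM : M = ((pl.zipIdx 0).filter (fun x => pvIsNamed x.1)).map
      (fun x => (x.2, theJ info (pvPName x.1))) := by
    show movesOf info pl 0 = _
    unfold movesOf
    apply flatMap_eq_map_of_singleton
    intro x hx
    rw [List.mem_filter] at hx
    have hx1 : x.1 ∈ pl := by
      obtain ⟨_, _, h3⟩ := List.mem_zipIdx hx.1
      rw [h3]
      exact List.getElem_mem _
    rw [hsingle x.1 hx1 hx.2]
    rfl
  have hitems : itemsOf info pl
      = (pl.filter pvIsNamed).map (fun p => (theJ info (pvPName p), pvVal p)) := by
    unfold itemsOf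
    apply flatMap_eq_map_of_singleton
    intro p hp
    rw [List.mem_filter] at hp
    rw [hsingle p hp.1 hp.2]
    rfl
  have hsrcs : M.map Prod.fst
      = ((pl.zipIdx 0).filter (fun x => pvIsNamed x.1)).map Prod.snd := by
    rw [hM, List.map_map]
    rfl
  have hsrc_pw : (M.map Prod.fst).Pairwise (· < ·) := by
    rw [hsrcs]
    exact List.pairwise_map.mpr ((zipIdx_snd_pairwise pl 0).filter _)
  have hsrc_lt : ∀ s ∈ M.map Prod.fst, s < pl.length := by
    rw [hsrcs]
    intro s hs
    rw [List.mem_map] at hs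
    obtain ⟨x, hx, rfl⟩ := hs
    rw [List.mem_filter] at hx
    obtain ⟨_, h2, _⟩ := List.mem_zipIdx hx.1
    omega
  have htgt : M.map Prod.snd = (pl.filter pvIsNamed).map (fun p => theJ info (pvPName p)) := by
    rw [hM, List.map_map]
    exact filter_zipIdx_map pvIsNamed (fun p => theJ info (pvPName p)) pl 0
  have htgt_nodup : (M.map Prod.snd).Nodup := by
    rw [htgt]
    have hfn : (pl.filter pvIsNamed).Nodup := hpre3.of_map
    apply List.Nodup.map_on _ hfn
    intro x hx y hy hxy
    have hnx : pvIsNamed x = true := (List.mem_filter.mp hx).2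
    have hny : pvIsNamed y = true := (List.mem_filter.mp hy).2
    have hxp : x ∈ pl := (List.mem_filter.mp hx).1
    have hyp : y ∈ pl := (List.mem_filter.mp hy).1
    have hmx : theJ info (pvPName x) ∈ pvMatchIdxs info (pvPName x) := by
      rw [hsingle x hxp hnx]; exact List.mem_singleton_self _
    have hmy : theJ info (pvPName y) ∈ pvMatchIdxs info (pvPName y) := by
      rw [hsingle y hyp hny]; exact List.mem_singleton_self _
    have hnames : pvPName x = pvPName y := pvMatchIdxs_inj (hxy ▸ hmx) hmy
    exact List.inj_on_of_nodup_map hpre3 hx hy hnames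
  -- A sorts the move map by reverse source position: that is reversal
  have hrev : mmSorted = M.reverse := by
    apply PySem.List.sorted_rev_eq_of_perm_of_pairwise_gt
    · exact List.reverse_perm M
    · rw [List.pairwise_reverse]
      exact List.pairwise_map.mp hsrc_pw
  have hplen : P.length = pl.length := List.length_map _
  have hpop := aPopLoop_eq M.reverse P 0 [] []
    (by rw [List.map_reverse, List.pairwise_reverse]
        exact hsrc_pw.imp (fun h => h))
    (by intro s hs
        rw [List.map_reverse, List.mem_reverse] at hs
        rw [hplen]
        exact hsrc_lt s hs)
  rw [hrev, hpop]
  dsimp only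
  simp only [List.nil_append]
  -- abbreviations for the popped state
  set captured := M.reverse.map (fun m => P.getD m.1 "") with hcap
  set mm2 := (M.reverse.zipIdx 0).map (fun x => (x.2, x.1.2)) with hmm2
  set mm3 := PySem.List.sorted mm2 (fun p => p.2) false with hmm3
  -- the fold over mm3 is a fold over its (target, value) pairs
  have hfold : mm3.foldl
      (fun l pr => PySem.List.insert l (pr.2 : Int) (captured.getD pr.1 "")) (eraseIdxs P (M.reverse.map Prod.fst))
      = (mm3.map (fun pr => (pr.2, captured.getD pr.1 ""))).foldl
          (fun l pr => PySem.List.insert l (pr.1 : Int) pr.2) (eraseIdxs P (M.reverse.map Prod.fst)) := by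
    rw [List.foldl_map]
  rw [hfold]
  set pairs := mm3.map (fun pr => (pr.2, captured.getD pr.1 "")) with hpairs
  -- the value list M ↦ (target, value) is exactly itemsOf
  have hvalP : ∀ x ∈ (pl.zipIdx 0).filter (fun x => pvIsNamed x.1), P.getD x.2 "" = pvVal x.1 := by
    intro x hx
    rw [List.mem_filter] at hx
    obtain ⟨h1, h2, h3⟩ := List.mem_zipIdx hx.1
    simp only [Nat.zero_add] at h2
    simp only [Nat.sub_zero] at h3
    have : P.getD x.2 "" = stripElem pl[x.2] := by
      rw [List.getD_eq_getElem?_getD]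
      show (P[x.2]?).getD "" = _
      rw [show P[x.2]? = some (stripElem pl[x.2]) from by
        rw [List.getElem?_map, List.getElem?_eq_getElem h2]
        rfl]
      rfl
    rw [this, ← h3]
    unfold stripElem
    rw [if_pos hx.2]
  have hitemsM : M.map (fun m => (m.2, P.getD m.1 "")) = itemsOf info pl := by
    rw [hitems, hM, List.map_map]
    rw [show ((fun m : Nat × Nat => (m.2, P.getD m.1 "")) ∘
        (fun x : String × Nat => (x.2, theJ info (pvPName x.1))))
        = fun x : String × Nat => (theJ info (pvPName x.1), P.getD x.2 "") from rfl]
    rw [List.map_congr_left (fun x hx => by rw [hvalP x hx])]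
    exact filter_zipIdx_map pvIsNamed (fun p => (theJ info (pvPName p), pvVal p)) pl 0
  -- mm2 mapped to its pairs is the reversed item list
  have hmm2f : mm2.map (fun pr => (pr.2, captured.getD pr.1 ""))
      = (M.map (fun m => (m.2, P.getD m.1 ""))).reverse := by
    rw [← List.map_reverse]
    apply List.ext_getElem
    · simp [hmm2]
    · intro t h1 h2
      simp only [hmm2, List.getElem_map, List.getElem_zipIdx]
      have hlt : t < M.reverse.length := by
        simp only [hmm2, List.length_map, List.length_zipIdx] at h1
        exact h1
      have hcapt : captured.getD t "" = P.getD (M.reverse[t].1) "" := by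
        rw [hcap, List.getD_eq_getElem?_getD, List.getElem?_map,
          List.getElem?_eq_getElem hlt]
        rfl
      rw [List.getD_eq_getElem?_getD, List.getD_eq_getElem?_getD] at hcapt
      simpa [List.getElem_reverse] using hcapt
  have hpairs_perm : pairs.Perm (itemsOf info pl) := by
    rw [hpairs]
    have h1 : mm3.Perm mm2 := PySem.List.sorted_perm mm2 (fun p => p.2) false
    refine (h1.map _).trans ?_
    rw [hmm2f, hitemsM]
    exact List.reverse_perm _
  have hpairs_fst : pairs.map Prod.fst = mm3.map Prod.snd := by
    rw [hpairs, List.map_map]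
    rfl
  have hmm3_snd_nodup : (mm3.map Prod.snd).Nodup := by
    have h1 : mm3.Perm mm2 := PySem.List.sorted_perm mm2 (fun p => p.2) false
    apply (h1.map Prod.snd).nodup_iff.mpr
    have : mm2.map Prod.snd = (M.reverse).map Prod.snd := by
      rw [hmm2, List.map_map]
      exact zipIdx_map_fst_comp (M.reverse) 0 Prod.snd
    rw [this, List.map_reverse]
    exact List.nodup_reverse.mpr htgt_nodup
  have hpairs_pw : (pairs.map Prod.fst).Pairwise (· < ·) := by
    rw [hpairs_fst]
    apply pairwise_lt_of_le_nodup _ hmm3_snd_nodup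
    exact List.pairwise_map.mpr (PySem.List.sorted_pairwise mm2 (fun p => p.2))
  have hts : PySem.List.sorted (itemsOf info pl) (fun pr => pr.1) false = pairs := by
    apply PySem.List.sorted_eq_of_perm_of_pairwise_lt
    · exact hpairs_perm
    · exact List.pairwise_map.mp hpairs_pw
  -- the remaining list after the pops is the non-named tail
  have hpl2 : eraseIdxs P (M.reverse.map Prod.fst) = pl.filter (fun p => !pvIsNamed p) := by
    rw [List.map_reverse]
    rw [eraseIdxs_eq_filter (M.map Prod.fst) P hsrc_pw (by rw [hplen]; exact hsrc_lt)]
    rw [show P.zipIdx = (pl.zipIdx).map (Prod.map stripElem id) from List.zipIdx_map]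
    rw [List.filter_map, List.map_map]
    have hpredeq : ∀ x ∈ pl.zipIdx,
        ((fun x : String × Nat => !(M.map Prod.fst).contains x.2) ∘ Prod.map stripElem id) x
          = !pvIsNamed x.1 := by
      intro x hx
      simp only [Function.comp_apply]
      have : (Prod.map stripElem id x).2 = x.2 := rfl
      rw [this]
      by_cases hn : pvIsNamed x.1 = true
      · have : x.2 ∈ M.map Prod.fst := by
          rw [hsrcs, List.mem_map]
          exact ⟨x, List.mem_filter.mpr ⟨hx, hn⟩, rfl⟩
        simp [hn, this]
      · have : x.2 ∉ M.map Prod.fst := by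
          rw [hsrcs, List.mem_map]
          rintro ⟨y, hy, hyx⟩
          rw [List.mem_filter] at hy
          have := zipIdx_snd_inj hy.1 hx hyx
          rw [← this] at hn
          exact hn hy.2
        simp [hn, this]
    rw [List.filter_congr hpredeq]
    rw [show ((fun x : String × Nat => Prod.fst x) ∘ Prod.map stripElem id)
        = fun x : String × Nat => stripElem x.1 from rfl]
    rw [filter_zipIdx_map (fun p => !pvIsNamed p) stripElem pl 0]
    have hid : List.map stripElem (pl.filter (fun p => !pvIsNamed p))
        = List.map id (pl.filter (fun p => !pvIsNamed p)) := by
      apply List.map_congr_left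
      intro p hp
      rw [List.mem_filter] at hp
      unfold stripElem
      rw [if_neg (by simpa using hp.2)]
      rfl
    rw [hid, List.map_id]
  rw [hpl2, hts]
  -- lengths add up
  have hlen : pairs.length + (pl.filter (fun p => !pvIsNamed p)).length = pl.length := by
    have h1 : pairs.length = (pl.filter pvIsNamed).length := by
      rw [hpairs, List.length_map, hmm3, PySem.List.length_sorted, hmm2,
        List.length_map, List.length_zipIdx, List.length_reverse, hM,
        List.length_map]
      have := congrArg List.length (filter_zipIdx_map pvIsNamed (fun p => p) pl 0)
      simpa using this
    rw [h1]
    exact List.length_eq_length_filter_add pvIsNamed |>.symm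
  rw [foldIns pairs _ hpairs_pw, hlen]

theorem reorder_named_args_spec : Claim_equal_reorder_named_args := by
  intro pl info hdom hpre
  unfold Spec_reorder_named_args
  obtain ⟨hpre1, hpre2, hpre3⟩ := hpre
  unfold reorder_named_args reorder_named_args_alt
  rw [aPhase1_eq, bCollect_eq]
  rw [show PySem.Dict.keys (PySem.Dict.mk ([] : List (Nat × String))) = ([] : List Nat) from rfl]
  by_cases hok : phOk info pl [] = true
  · rw [if_pos hok, if_pos hok]
    dsimp only
    simp only [List.nil_append]
    have := main_ok pl info hpre2 hpre3
    simpa using this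
  · rw [if_neg hok, if_neg hok]
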